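-- pv_equiv track=rewrite | github.com/thisismuskaangupta/Bioinformatics-Database-Load-and-Fetch | methodsandclasses.py | met_annot_parser
-- ===== SOURCE A (Python) =====
-- def met_annot_parser(input_list):
--     #list indexes 0, 1, 2, 5 are the peakID, metabolite name, KEGG and Pathway respectively, we only clean these since this is the data we want to finally store in the database.
--     peakID = input_list[0]
--     Metabolite_Name = input_list[1]
--     KEGG = input_list[2]
--     Pathway = input_list[5]
--     #error handling for the peakID not existing has been added in the main script.
--
--     #output_list_of_lists will be the cleaned data ready to be inserted into the database. an empty list is created to store this. this will be a list of lists, where every sub-list is one instance of data ready to be stored in the database.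
--     output_list_of_lists = []
--
--     if KEGG is None or KEGG in ['','NA','unknown','Unknown']: #if KEGG does not exist, it is converted to NoneType in python. if it does exist, then it is parsed.
--         KEGG = None
--     #if KEGG is associated with multiple peaks, then it will have a number associated with it. this should be removed.
--     elif KEGG[-3:] in ['(1)','(2)','(3)','(4)','(5)']:
--         KEGG = KEGG[:-3]
--
--     #now, the KEGG has been cleaned in two ways, empty data has been converted to NoneType and the number is removed. now, if KEGG has multiple annotations separated by '|', we want to separate these.
--     if KEGG is not None:
--         KEGG_list = KEGG.split('|') #we create a list of each value in the KEGG string.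
--         #this list will be used to create the output.
--
--     #the same logic is applied to clean the metabolite name data.
--     if Metabolite_Name is None or Metabolite_Name in ['','NA','unknown','Unknown']:
--         Metabolite_Name = None
--
--     elif Metabolite_Name[-3:] in ['(1)','(2)','(3)','(4)','(5)']:
--         Metabolite_Name = Metabolite_Name[:-3]
--
--     if Metabolite_Name is not None:
--         Metabolite_Name_list = Metabolite_Name.split('|') #we create a list of each value in the KEGG string.
--         #this list will be used to create the output.
--
--     #we clean empty data in the pathway column as well.
--     #it can be assumed that every entry in the pathway column is either empty or has one instance of data.
--     if Pathway is None or Pathway in ['','NA','unknown','Unknown']: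
--         Pathway = None
--
--     #Now that we have individually parsed the metabolite name, KEGG and the Pathway, the output_list_of_lists can be created.
--     #There are four possible cases here, that both metabolite name and KEGG are lists, that both are NoneType, and that one is a list and the other is a NoneType.
--
--     #Case I - that both are lists
--     #if metabolite name is a list containing multiple entries, e.g. ['name1','name2'] and KEGG is a list containing multiple entries, e.g. ['KEGG1','KEGG2'], then we want to store these in the database as separate instances, like so - instance one - ['PeakID','name1','KEGG1','Pathway'], and instance two - ['PeakID','name2','KEGG2','Pathway']. Our input list is formatted such that their indexes correspond, meaning the first value of metabolite name list should correspond to the first value in the KEGG list, so name1 corresponds to KEGG1 in the example, and so on.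
--     #the function should return them in the following format - [['PeakID','name1','KEGG1','Pathway'],['PeakID','name2','KEGG2','Pathway']]
--     if KEGG is not None and Metabolite_Name is not None:
--         for number in range(0,len(KEGG_list),):
--             output_list_of_lists.append([peakID,Metabolite_Name_list[number],KEGG_list[number],Pathway]) #this will iterate x number of times, where x is the number of items in the KEGG_list, which is the same as the metabolite name list. it is stored in the manner described in above example.
--
--     #Case II - that both are NoneType
--     elif KEGG is None and Metabolite_Name is None:
--         output_list_of_lists.append([peakID,Metabolite_Name,KEGG,Pathway]) #if both are NoneType, then only one list may be created and stored.
--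
--     #Case III - that metabolite name is a list and KEGG is NoneType
--     elif KEGG is None and Metabolite_Name is not None:
--         for number in range(0,len(Metabolite_Name_list,)):
--             output_list_of_lists.append([peakID,Metabolite_Name_list[number],KEGG,Pathway])
--             #in this loop, where metabolite name may be ['name1','name2'], the resultant final list should be [['PeakID','name1',None,'Pathway'],['PeakID','name2',None,'Pathway']]
--
--     #Case IV - that metabolite name is None and KEGG is a list (similar logic as Case III)
--     elif KEGG is not None and Metabolite_Name is None:
--         for number in range(0,len(KEGG_list),):
--             output_list_of_lists.append([peakID,Metabolite_Name,KEGG_list[number],Pathway])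
--
--     #the output list is now ready to be inserted into the database. hence, the function has finished cleaning the data and preparing the output.
--     return output_list_of_lists
-- ===== SOURCE B (Python) =====
-- _SENTINELS = ('', 'NA', 'unknown', 'Unknown')
--
--
-- def _clean(s):
--     """None-coerce sentinel values and strip a trailing '(1)'..'(5)' tag."""
--     if s is None or s in _SENTINELS:
--         return None
--     if s[-3:] in ('(1)', '(2)', '(3)', '(4)', '(5)'):
--         s = s[:-3]
--     return s
--
--
-- def _head_tail(s):
--     """First '|'-part of s and the remainder (None when nothing is left)."""
--     if s is None:
--         return None, None
--     j = s.find('|')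
--     if j < 0:
--         return s, None
--     return s[:j], s[j + 1:]
--
--
-- def met_annot_parser(input_list):
--     peakID = input_list[0]
--     met = _clean(input_list[1])
--     kegg = _clean(input_list[2])
--     pathway = input_list[5]
--     if pathway is None or pathway in _SENTINELS:
--         pathway = None
--     # Scan the two annotation strings in parallel, cutting one '|'-part off each
--     # per row; the KEGG string drives when active, else the metabolite-name string.
--     # The part lists are never materialized.
--     rows = []
--     while True:
--         met_head, met_tail = _head_tail(met)
--         kegg_head, kegg_tail = _head_tail(kegg)
--         rows.append([peakID, met_head, kegg_head, pathway])
--         if (kegg_tail if kegg is not None else met_tail) is None: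
--             return rows
--         met, kegg = met_tail, kegg_tail
-- ===== Notes on version B (the rewrite author's own statement) =====
-- stated objective: alternative
-- what changed: A splits the cleaned fields into part lists and emits rows via four explicit cases with indexed loops; B never materializes the part lists: a single iterative scan consumes the two annotation strings in parallel, cutting one '|'-part off each per emitted row, with the KEGG string driving when active.
import Mathlib
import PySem

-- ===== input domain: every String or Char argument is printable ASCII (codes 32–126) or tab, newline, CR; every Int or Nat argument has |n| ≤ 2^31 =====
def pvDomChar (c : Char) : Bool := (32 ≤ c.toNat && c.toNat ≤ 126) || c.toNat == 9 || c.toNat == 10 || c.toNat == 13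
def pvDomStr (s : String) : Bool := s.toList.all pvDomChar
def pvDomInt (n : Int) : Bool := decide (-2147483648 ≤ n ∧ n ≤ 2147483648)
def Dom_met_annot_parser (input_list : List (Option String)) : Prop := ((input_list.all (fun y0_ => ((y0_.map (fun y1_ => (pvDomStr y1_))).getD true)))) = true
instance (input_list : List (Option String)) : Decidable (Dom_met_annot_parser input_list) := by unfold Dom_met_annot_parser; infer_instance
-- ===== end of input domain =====

-- B replaces A's split-into-part-lists plus four indexed output cases by one iterative
-- parallel scan that cuts one '|'-part off each annotation string per row (objective:
-- alternative); return value only, no argument mutation involved.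

-- ===== PORT A =====
-- A's two-step cleaning of KEGG / Metabolite_Name: sentinel → None, else strip a trailing '(1)'..'(5)'
def pvCleanStrA (s : Option String) : Option String :=
  match s with
  | none => none
  | some k =>
    if k == "" || k == "NA" || k == "unknown" || k == "Unknown" then none
    else if PySem.Str.slice k (some (-3)) none == "(1)" || PySem.Str.slice k (some (-3)) none == "(2)" ||
            PySem.Str.slice k (some (-3)) none == "(3)" || PySem.Str.slice k (some (-3)) none == "(4)" ||
            PySem.Str.slice k (some (-3)) none == "(5)" then
      some (PySem.Str.slice k none (some (-3)))
    else some k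

-- A's 'if X is not None: X_list = X.split('|')' (the list exists only when X is not None)
def pvSplitA (s : Option String) : Option (List String) :=
  match s with
  | none => none
  | some k => some ((PySem.Str.split? k "|").getD [])

def met_annot_parser (input_list : List (Option String)) : List (List (Option String)) :=
  let peakID := PySem.List.pyGetD input_list 0 none
  let metName := pvCleanStrA (PySem.List.pyGetD input_list 1 none)
  let kegg := pvCleanStrA (PySem.List.pyGetD input_list 2 none)
  let keggList := pvSplitA kegg
  let metList := pvSplitA metName
  let pathway : Option String :=
    match PySem.List.pyGetD input_list 5 none with
    | none => none
    | some p => if p == "" || p == "NA" || p == "unknown" || p == "Unknown" then none else some p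
  -- Case I .. Case IV, exactly A's branch structure
  match keggList, metList with
  | some kl, some ml =>
      (PySem.List.pyRange 0 (kl.length : Int) 1).foldl
        (fun acc number =>
          acc ++ [[peakID, some (PySem.List.pyGetD ml number ""), some (PySem.List.pyGetD kl number ""), pathway]]) []
  | none, none => [] ++ [[peakID, none, none, pathway]]
  | none, some ml =>
      (PySem.List.pyRange 0 (ml.length : Int) 1).foldl
        (fun acc number => acc ++ [[peakID, some (PySem.List.pyGetD ml number ""), none, pathway]]) []
  | some kl, none =>
      (PySem.List.pyRange 0 (kl.length : Int) 1).foldl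
        (fun acc number => acc ++ [[peakID, none, some (PySem.List.pyGetD kl number ""), pathway]]) []

-- ===== PORT B =====
-- Source B's _clean: sentinel → None, strip a trailing '(1)'..'(5)' tag
def pvCleanB (s : Option String) : Option String :=
  match s with
  | none => none
  | some t =>
    if t == "" || t == "NA" || t == "unknown" || t == "Unknown" then none
    else if PySem.Str.slice t (some (-3)) none == "(1)" || PySem.Str.slice t (some (-3)) none == "(2)" ||
            PySem.Str.slice t (some (-3)) none == "(3)" || PySem.Str.slice t (some (-3)) none == "(4)" ||
            PySem.Str.slice t (some (-3)) none == "(5)" then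
      some (PySem.Str.slice t none (some (-3)))
    else some t

-- Source B's _head_tail: first '|'-part and the remainder (none when nothing is left)
def pvHeadTailB (s : Option String) : Option String × Option String :=
  match s with
  | none => (none, none)
  | some t =>
    let j := PySem.Str.find t "|"
    if j < 0 then (some t, none)
    else (some (PySem.Str.slice t none (some j)), some (PySem.Str.slice t (some (j + 1)) none))

def pvMu : Option String → Nat
  | none => 0
  | some t => t.toList.length + 1

-- Source B's while loop; the fuel only makes the loop total in Lean (each continuing step
-- consumes at least one character of met/kegg, so the 0 case is never reached)
def pvRowsB (fuel : Nat) (peakID met kegg pathway : Option String)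
    (rows : List (List (Option String))) : List (List (Option String)) :=
  match fuel with
  | 0 => rows
  | f + 1 =>
    let mp := pvHeadTailB met
    let kp := pvHeadTailB kegg
    let rows' := rows ++ [[peakID, mp.1, kp.1, pathway]]
    match (if kegg.isSome then kp.2 else mp.2) with
    | none => rows'
    | some _ => pvRowsB f peakID mp.2 kp.2 pathway rows'

def met_annot_parser_alt (input_list : List (Option String)) : List (List (Option String)) :=
  let peakID := PySem.List.pyGetD input_list 0 none
  let met := pvCleanB (PySem.List.pyGetD input_list 1 none)
  let kegg := pvCleanB (PySem.List.pyGetD input_list 2 none)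
  let pathway : Option String :=
    match PySem.List.pyGetD input_list 5 none with
    | none => none
    | some p => if p == "" || p == "NA" || p == "unknown" || p == "Unknown" then none else some p
  pvRowsB (pvMu met + pvMu kegg + 1) peakID met kegg pathway []

-- ===== PRECONDITION & SPEC =====
-- Pre_ excludes exactly the inputs where Python A raises IndexError: lists shorter than 6,
-- and inputs whose active KEGG field has more '|'-separated parts than the active
-- Metabolite_Name field (A indexes the metabolite list by the KEGG list's range).
def pvBars (s : String) : Nat := s.toList.countP (fun c => c = '|')

def pvFields (s : Option String) : Option Nat :=
  match s with
  | none => none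
  | some t =>
    if t == "" || t == "NA" || t == "unknown" || t == "Unknown" then none
    else some (pvBars t + 1)

def pvLeOpt : Option Nat → Option Nat → Bool
  | some a, some b => a ≤ b
  | _, _ => true

def Pre_met_annot_parser (input_list : List (Option String)) : Prop :=
  6 ≤ input_list.length ∧
  pvLeOpt (pvFields (input_list.getD 2 none)) (pvFields (input_list.getD 1 none)) = true

instance (input_list : List (Option String)) : Decidable (Pre_met_annot_parser input_list) := by
  unfold Pre_met_annot_parser; infer_instance

def pvWitness_met_annot_parser : List (Option String) :=
  [some "P1", some "name1|name2", some "K1|K2(3)", none, none, some "pathX"]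

def Spec_met_annot_parser (input_list : List (Option String)) (out : List (List (Option String))) : Prop := out = met_annot_parser_alt input_list
instance (input_list : List (Option String)) (out : List (List (Option String))) : Decidable (Spec_met_annot_parser input_list out) := by unfold Spec_met_annot_parser; infer_instance

-- ===== CLAIM (what is proved, stated in full; the proofs are below) =====
def Claim_equal_met_annot_parser : Prop := ∀ (input_list : List (Option String)), Dom_met_annot_parser input_list → Pre_met_annot_parser input_list → Spec_met_annot_parser input_list (met_annot_parser input_list)

-- ===== LEMMAS AND PROOFS =====

-- The two cleaning helpers are the same function
lemma pvCleanB_eq_cleanA (s : Option String) : pvCleanB s = pvCleanStrA s := by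
  cases s <;> rfl

-- proof-side structural splitter: barSplit l is l split at every '|'
def barSplit : List Char → List (List Char)
  | [] => [[]]
  | c :: t =>
    if c = '|' then [] :: barSplit t
    else
      match barSplit t with
      | [] => [[c]]
      | h :: r => (c :: h) :: r

def consAcc (p : List Char) : List (List Char) → List (List Char)
  | [] => [p]
  | h :: r => (p ++ h) :: r

lemma barSplit_ne_nil (l : List Char) : barSplit l ≠ [] := by
  cases l with
  | nil => simp [barSplit]
  | cons c t =>
    simp only [barSplit]
    split
    · simp
    · split <;> simp

lemma consAcc_nil (bs : List (List Char)) (h : bs ≠ []) : consAcc [] bs = bs := by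
  cases bs with
  | nil => exact absurd rfl h
  | cons a r => simp [consAcc]

-- str.split('|') computes barSplit: characterization of PySem's fuel-based splitOn.go
lemma splitOn_go_bar (s : List Char) : ∀ (fuel : Nat) (cur : List Char) (acc : List (List Char)),
    s.length < fuel →
    PySem.Chars.splitOn.go ['|'] fuel s cur acc = acc.reverse ++ consAcc cur.reverse (barSplit s) := by
  induction s with
  | nil =>
    intro fuel cur acc hf
    match fuel with
    | f + 1 => simp [PySem.Chars.splitOn.go, barSplit, consAcc]
  | cons c t ih =>
    intro fuel cur acc hf
    match fuel with
    | f + 1 =>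
      have hpre : List.isPrefixOf ['|'] (c :: t) = (c == '|') := by
        simp [List.isPrefixOf, eq_comm]
      by_cases hc : c = '|'
      · have hgo : PySem.Chars.splitOn.go ['|'] (f+1) (c :: t) cur acc
            = PySem.Chars.splitOn.go ['|'] f t [] (cur.reverse :: acc) := by
          simp [PySem.Chars.splitOn.go, hc]
        rw [hgo, ih f [] (cur.reverse :: acc) (by simpa using hf)]
        simp only [barSplit, if_pos hc]
        rcases hbs : barSplit t with _ | ⟨h, r⟩
        · exact absurd hbs (barSplit_ne_nil t)
        · simp [consAcc]
      · have hgo : PySem.Chars.splitOn.go ['|'] (f+1) (c :: t) cur acc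
            = PySem.Chars.splitOn.go ['|'] f t (c :: cur) acc := by
          simp [PySem.Chars.splitOn.go, hpre, hc]
        rw [hgo, ih f (c :: cur) acc (by simpa using hf)]
        simp only [barSplit, if_neg hc]
        rcases hbs : barSplit t with _ | ⟨h, r⟩
        · exact absurd hbs (barSplit_ne_nil t)
        · simp [consAcc]

lemma splitOn_bar (s : List Char) : PySem.Chars.splitOn s ['|'] = barSplit s := by
  unfold PySem.Chars.splitOn
  rw [splitOn_go_bar s (s.length + 1) [] [] (by omega)]
  simp [consAcc_nil _ (barSplit_ne_nil s)]

-- s.find('|') recurrence, from PySem's find.go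
lemma find_go_bar (s : List Char) : ∀ k : Nat,
    PySem.Chars.find.go ['|'] s k =
      if PySem.Chars.find.go ['|'] s 0 = -1 then -1 else PySem.Chars.find.go ['|'] s 0 + k := by
  induction s with
  | nil => intro k; simp [PySem.Chars.find.go]
  | cons c t ih =>
    intro k
    have hpre : List.isPrefixOf ['|'] (c :: t) = (c == '|') := by
      simp [List.isPrefixOf, eq_comm]
    by_cases hc : c = '|'
    · simp [PySem.Chars.find.go, hc]
    · have hg : ∀ j : Nat, PySem.Chars.find.go ['|'] (c :: t) j = PySem.Chars.find.go ['|'] t (j + 1) := by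
        intro j; simp [PySem.Chars.find.go, hpre, hc]
      rw [hg k, hg 0, ih (k + 1), ih 1]
      have hge : PySem.Chars.find.go ['|'] t 0 = -1 ∨ 0 ≤ PySem.Chars.find.go ['|'] t 0 := by
        have := PySem.Chars.neg_one_le_find t ['|']
        unfold PySem.Chars.find at this
        omega
      rcases hge with h | h
      · simp [h]
      · rw [if_neg (by omega), if_neg (by omega), if_neg (by omega)]
        push_cast; ring

lemma find_bar_cons (c : Char) (t : List Char) :
    PySem.Chars.find (c :: t) ['|'] =
      if c = '|' then 0
      else if PySem.Chars.find t ['|'] = -1 then -1 else PySem.Chars.find t ['|'] + 1 := by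
  unfold PySem.Chars.find
  have hpre : List.isPrefixOf ['|'] (c :: t) = (c == '|') := by
    simp [List.isPrefixOf, eq_comm]
  by_cases hc : c = '|'
  · simp [PySem.Chars.find.go, hc]
  · have hg : PySem.Chars.find.go ['|'] (c :: t) 0 = PySem.Chars.find.go ['|'] t 1 := by
      simp [PySem.Chars.find.go, hpre, hc]
    rw [hg, if_neg hc, find_go_bar t 1]
    push_cast
    rfl

lemma find_bar_nil : PySem.Chars.find ([] : List Char) ['|'] = -1 := by
  simp [PySem.Chars.find, PySem.Chars.find.go]

-- barSplit through the first '|' (or none)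
lemma barSplit_find (s : List Char) :
    (PySem.Chars.find s ['|'] = -1 → barSplit s = [s]) ∧
    (∀ n : Nat, PySem.Chars.find s ['|'] = n → barSplit s = s.take n :: barSplit (s.drop (n + 1))) := by
  induction s with
  | nil =>
    refine ⟨fun _ => rfl, fun n hn => ?_⟩
    rw [find_bar_nil] at hn; omega
  | cons c t ih =>
    rw [find_bar_cons] at *
    by_cases hc : c = '|'
    · rw [if_pos hc]
      refine ⟨fun h => by omega, fun n hn => ?_⟩
      have hn0 : n = 0 := by omega
      subst hn0
      simp [barSplit, hc]
    · rw [if_neg hc]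
      by_cases hm : PySem.Chars.find t ['|'] = -1
      · rw [if_pos hm]
        refine ⟨fun _ => ?_, fun n hn => by omega⟩
        simp only [barSplit, if_neg hc, ih.1 hm]
      · rw [if_neg hm]
        have h0 : 0 ≤ PySem.Chars.find t ['|'] := by
          have := PySem.Chars.neg_one_le_find t ['|']; omega
        refine ⟨fun h => by omega, fun n hn => ?_⟩
        obtain ⟨hfn, h1n⟩ : PySem.Chars.find t ['|'] = ((n - 1 : Nat) : Int) ∧ 1 ≤ n := by omega
        have := (ih.2 (n-1)) hfn
        simp only [barSplit, if_neg hc, this]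
        have hn' : n = (n - 1) + 1 := by omega
        rw [hn']
        simp [List.take_succ_cons, List.drop_succ_cons]

lemma barSplit_of_find_neg (s : List Char) (h : PySem.Chars.find s ['|'] = -1) :
    barSplit s = [s] := (barSplit_find s).1 h

lemma barSplit_of_find_nat (s : List Char) (n : Nat) (h : PySem.Chars.find s ['|'] = n) :
    barSplit s = s.take n :: barSplit (s.drop (n + 1)) := (barSplit_find s).2 n h

lemma barSplit_length (l : List Char) : (barSplit l).length = l.countP (fun c => decide (c = '|')) + 1 := by
  induction l with
  | nil => simp [barSplit]
  | cons c t ih =>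
    simp only [barSplit]
    by_cases hc : c = '|'
    · simp [hc, ih]
    · rcases hbs : barSplit t with _ | ⟨h, r⟩
      · exact absurd hbs (barSplit_ne_nil t)
      · rw [if_neg hc]
        simp only [List.length_cons, List.countP_cons]
        rw [hbs] at ih
        simp only [List.length_cons] at ih
        simp [hc, ih]

-- the common specification both ports are reduced to
def specRows (pid : Option String) (mp kp : Option (List (List Char))) (pw : Option String) :
    List (List (Option String)) :=
  match kp, mp with
  | some kl, some ml =>
      (List.range kl.length).map (fun i =>
        [pid, some (String.ofList (ml.getD i [])), some (String.ofList (kl.getD i [])), pw])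
  | none, none => [[pid, none, none, pw]]
  | none, some ml => ml.map (fun p => [pid, some (String.ofList p), none, pw])
  | some kl, none => kl.map (fun p => [pid, none, some (String.ofList p), pw])

lemma getD_map_ofList (l : List (List Char)) (i : Nat) :
    (l.map String.ofList).getD i "" = String.ofList (l.getD i []) := by
  rcases h : l[i]? with _ | x
  · simp only [List.getD, h, List.getElem?_map, Option.map_none, Option.getD_none]
  · simp [List.getD, h, List.getElem?_map]

lemma map_range_getD {α β : Type} (l : List α) (d : α) (f : α → β) :
    (List.range l.length).map (fun i => f (l.getD i d)) = l.map f := by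
  apply List.ext_getElem
  · simp
  · intro i h1 h2
    simp only [List.getElem_map, List.getElem_range]
    rw [List.getD_eq_getElem l d (by simpa using h1)]

lemma splitA_eq (t : String) :
    (PySem.Str.split? t "|").getD [] = (barSplit t.toList).map String.ofList := by
  simp [PySem.Str.split?, PySem.Chars.split?, splitOn_bar]

-- A equals specRows on the barSplit part lists
lemma portA_eq_spec (input_list : List (Option String)) :
    met_annot_parser input_list =
      specRows (PySem.List.pyGetD input_list 0 none)
        ((pvCleanStrA (PySem.List.pyGetD input_list 1 none)).map (fun t => barSplit t.toList))
        ((pvCleanStrA (PySem.List.pyGetD input_list 2 none)).map (fun t => barSplit t.toList))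
        (match PySem.List.pyGetD input_list 5 none with
         | none => none
         | some p => if p == "" || p == "NA" || p == "unknown" || p == "Unknown" then none else some p) := by
  unfold met_annot_parser
  rcases hm : pvCleanStrA (PySem.List.pyGetD input_list 1 none) with _ | m <;>
    rcases hk : pvCleanStrA (PySem.List.pyGetD input_list 2 none) with _ | k <;>
    simp only [pvSplitA, specRows, Option.map_none, Option.map_some, splitA_eq,
      PySem.List.foldl_append_singleton_eq_map, List.nil_append, PySem.List.pyRange_zero_natCast,
      List.map_map, Function.comp_def, PySem.List.pyGetD_natCast, getD_map_ofList, List.length_map]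
  · exact map_range_getD (barSplit k.toList) []
      (fun p => [PySem.List.pyGetD input_list 0 none, none, some (String.ofList p), _])
  · exact map_range_getD (barSplit m.toList) []
      (fun p => [PySem.List.pyGetD input_list 0 none, some (String.ofList p), none, _])

-- bridges from Source B's string primitives to take/drop on the character list
lemma strFind_bar (t : String) : PySem.Str.find t "|" = PySem.Chars.find t.toList ['|'] := by
  have h : "|".toList = ['|'] := by decide
  simp [PySem.Str.find, h]

lemma sliceTo_eq (t : String) (n : Nat) :
    PySem.Str.slice t none (some (n : Int)) = String.ofList (t.toList.take n) := by
  unfold PySem.Str.slice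
  rw [PySem.Chars.slice_eq_listSlice, PySem.List.slice_to _ (by omega)]
  simp

lemma sliceFrom_eq (t : String) (n : Nat) :
    PySem.Str.slice t (some (n : Int)) none = String.ofList (t.toList.drop n) := by
  unfold PySem.Str.slice
  rw [PySem.Chars.slice_eq_listSlice, PySem.List.slice_from _ (by omega)]
  simp

lemma find_neg_iff (l : List Char) : PySem.Chars.find l ['|'] < 0 ↔ PySem.Chars.find l ['|'] = -1 := by
  have := PySem.Chars.neg_one_le_find l ['|']
  omega

lemma headTail_none : pvHeadTailB none = (none, none) := rfl

lemma headTail_neg (t : String) (hf : PySem.Chars.find t.toList ['|'] < 0) :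
    pvHeadTailB (some t) = (some t, none) := by
  show (if PySem.Str.find t "|" < 0 then _ else _) = _
  rw [strFind_bar, if_pos hf]

lemma headTail_pos (t : String) (n : Nat) (hf : PySem.Chars.find t.toList ['|'] = (n : Int)) :
    pvHeadTailB (some t) =
      (some (String.ofList (t.toList.take n)), some (String.ofList (t.toList.drop (n + 1)))) := by
  show (if PySem.Str.find t "|" < 0 then _ else (some (PySem.Str.slice t none (some (PySem.Str.find t "|"))), some (PySem.Str.slice t (some (PySem.Str.find t "|" + 1)) none))) = _
  rw [strFind_bar, hf, if_neg (by omega),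
    (show ((n : Int) + 1) = ((n + 1 : Nat) : Int) by push_cast; ring), sliceTo_eq, sliceFrom_eq]

-- B's loop equals specRows when the KEGG part list is no longer than the met part list
lemma rowsB_spec : ∀ (fuel : Nat) (met kegg pid pw : Option String) (acc : List (List (Option String))),
    pvMu met + pvMu kegg < fuel →
    (∀ m k, met = some m → kegg = some k →
      (barSplit k.toList).length ≤ (barSplit m.toList).length) →
    pvRowsB fuel pid met kegg pw acc =
      acc ++ specRows pid (met.map (fun t => barSplit t.toList)) (kegg.map (fun t => barSplit t.toList)) pw := by
  intro fuel
  induction fuel with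
  | zero => intro met kegg pid pw acc h _; omega
  | succ f ih =>
    intro met kegg pid pw acc h hle
    rcases hkg : kegg with _ | k <;> subst hkg
    · rcases hmt : met with _ | m <;> subst hmt
      · simp [pvRowsB, pvHeadTailB, specRows]
      · -- kegg none, met some
        by_cases hf : PySem.Chars.find m.toList ['|'] < 0
        · have hm1 : barSplit m.toList = [m.toList] :=
            barSplit_of_find_neg _ ((find_neg_iff _).mp hf)
          simp [pvRowsB, headTail_none, headTail_neg m hf, specRows, hm1]
        · set n : Nat := (PySem.Chars.find m.toList ['|']).toNat with hn
          have hfn : PySem.Chars.find m.toList ['|'] = (n : Int) := by omega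
          have hnlt : n < m.toList.length := by
            have hsp := PySem.Chars.find_spec (s := m.toList) (sub := ['|']) (by omega)
            have hlen1 := hsp.1.length_le
            simp [hfn] at hlen1 ⊢
            omega
          have hms : barSplit m.toList = m.toList.take n :: barSplit (m.toList.drop (n + 1)) :=
            barSplit_of_find_nat _ n hfn
          have hstep : pvRowsB (f+1) pid (some m) none pw acc =
              pvRowsB f pid (some (String.ofList (m.toList.drop (n+1)))) none pw
                (acc ++ [[pid, some (String.ofList (m.toList.take n)), none, pw]]) := by
            simp [pvRowsB, headTail_none, headTail_pos m n hfn]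
          rw [hstep, ih (some (String.ofList (m.toList.drop (n+1)))) none pid pw
            (acc ++ [[pid, some (String.ofList (m.toList.take n)), none, pw]])
            (by simp only [pvMu, String.toList_ofList, List.length_drop] at h ⊢; omega)
            (by intro _ _ _ hk; cases hk)]
          simp [specRows, hms]
    · rcases hmt : met with _ | m <;> subst hmt
      · -- met none, kegg some
        by_cases hf : PySem.Chars.find k.toList ['|'] < 0
        · have hk1 : barSplit k.toList = [k.toList] :=
            barSplit_of_find_neg _ ((find_neg_iff _).mp hf)
          simp [pvRowsB, headTail_none, headTail_neg k hf, specRows, hk1]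
        · set n : Nat := (PySem.Chars.find k.toList ['|']).toNat with hn
          have hfn : PySem.Chars.find k.toList ['|'] = (n : Int) := by omega
          have hnlt : n < k.toList.length := by
            have hsp := PySem.Chars.find_spec (s := k.toList) (sub := ['|']) (by omega)
            have hlen1 := hsp.1.length_le
            simp [hfn] at hlen1 ⊢
            omega
          have hks : barSplit k.toList = k.toList.take n :: barSplit (k.toList.drop (n + 1)) :=
            barSplit_of_find_nat _ n hfn
          have hstep : pvRowsB (f+1) pid none (some k) pw acc =
              pvRowsB f pid none (some (String.ofList (k.toList.drop (n+1)))) pw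
                (acc ++ [[pid, none, some (String.ofList (k.toList.take n)), pw]]) := by
            simp [pvRowsB, headTail_none, headTail_pos k n hfn]
          rw [hstep, ih none (some (String.ofList (k.toList.drop (n+1)))) pid pw
            (acc ++ [[pid, none, some (String.ofList (k.toList.take n)), pw]])
            (by simp only [pvMu, String.toList_ofList, List.length_drop] at h ⊢; omega)
            (by intro _ _ hm; cases hm)]
          simp [specRows, hks]
      · -- both some
        have hlen : (barSplit k.toList).length ≤ (barSplit m.toList).length :=
          hle m k rfl rfl
        by_cases hf : PySem.Chars.find k.toList ['|'] < 0
        · -- last KEGG part: one row, stop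
          have hk1 : barSplit k.toList = [k.toList] :=
            barSplit_of_find_neg _ ((find_neg_iff _).mp hf)
          by_cases hfm : PySem.Chars.find m.toList ['|'] < 0
          · have hm1 : barSplit m.toList = [m.toList] :=
              barSplit_of_find_neg _ ((find_neg_iff _).mp hfm)
            simp [pvRowsB, headTail_neg k hf, headTail_neg m hfm, specRows, hk1, hm1]
          · set p : Nat := (PySem.Chars.find m.toList ['|']).toNat with hp
            have hfp : PySem.Chars.find m.toList ['|'] = (p : Int) := by omega
            have hms : barSplit m.toList = m.toList.take p :: barSplit (m.toList.drop (p + 1)) :=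
              barSplit_of_find_nat _ p hfp
            simp [pvRowsB, headTail_neg k hf, headTail_pos m p hfp, specRows, hk1, hms]
        · -- KEGG has a further part: met must too (Pre_), recurse
          set n : Nat := (PySem.Chars.find k.toList ['|']).toNat with hn
          have hfn : PySem.Chars.find k.toList ['|'] = (n : Int) := by omega
          have hnlt : n < k.toList.length := by
            have hsp := PySem.Chars.find_spec (s := k.toList) (sub := ['|']) (by omega)
            have hlen1 := hsp.1.length_le
            simp [hfn] at hlen1 ⊢
            omega
          have hks : barSplit k.toList = k.toList.take n :: barSplit (k.toList.drop (n + 1)) :=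
            barSplit_of_find_nat _ n hfn
          have hklen : 2 ≤ (barSplit k.toList).length := by
            rw [hks]
            have hne := barSplit_ne_nil (k.toList.drop (n + 1))
            cases hbs : barSplit (k.toList.drop (n + 1)) with
            | nil => exact absurd hbs hne
            | cons a r => simp
          have hfm : ¬ PySem.Chars.find m.toList ['|'] < 0 := by
            intro hneg
            have hm1 : barSplit m.toList = [m.toList] :=
              barSplit_of_find_neg _ ((find_neg_iff _).mp hneg)
            rw [hm1] at hlen
            simp at hlen
            omega
          set p : Nat := (PySem.Chars.find m.toList ['|']).toNat with hp
          have hfp : PySem.Chars.find m.toList ['|'] = (p : Int) := by omega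
          have hplt : p < m.toList.length := by
            have hsp := PySem.Chars.find_spec (s := m.toList) (sub := ['|']) (by omega)
            have hlen1 := hsp.1.length_le
            simp [hfp] at hlen1 ⊢
            omega
          have hms : barSplit m.toList = m.toList.take p :: barSplit (m.toList.drop (p + 1)) :=
            barSplit_of_find_nat _ p hfp
          have hstep : pvRowsB (f+1) pid (some m) (some k) pw acc =
              pvRowsB f pid (some (String.ofList (m.toList.drop (p+1))))
                (some (String.ofList (k.toList.drop (n+1)))) pw
                (acc ++ [[pid, some (String.ofList (m.toList.take p)),
                          some (String.ofList (k.toList.take n)), pw]]) := by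
            simp [pvRowsB, headTail_pos k n hfn, headTail_pos m p hfp]
          rw [hstep, ih (some (String.ofList (m.toList.drop (p+1))))
            (some (String.ofList (k.toList.drop (n+1)))) pid pw
            (acc ++ [[pid, some (String.ofList (m.toList.take p)),
                      some (String.ofList (k.toList.take n)), pw]])
            (by simp only [pvMu, String.toList_ofList, List.length_drop] at h ⊢; omega)
            (by intro m' k' hm' hk'
                simp only [Option.some_inj] at hm' hk'
                subst hm'; subst hk'
                simp only [String.toList_ofList]
                rw [hks, hms] at hlen
                simpa using hlen)]
          simp only [Option.map_some, String.toList_ofList]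
          rw [hks, hms]
          simp only [specRows, List.length_cons, List.range_succ_eq_map, List.map_cons,
            List.map_map, Function.comp_def, List.getD_cons_succ, List.getD_cons_zero]
          simp

-- pvFields counts exactly the parts of the cleaned string
lemma countP_strip (t : String) (x : String) (hx : x.toList.countP (fun c => decide (c = '|')) = 0)
    (hEq : PySem.Str.slice t (some (-3)) none = x) :
    (t.toList.take (t.toList.length - 3)).countP (fun c => decide (c = '|'))
      = t.toList.countP (fun c => decide (c = '|')) := by
  have hdrop : (PySem.Str.slice t (some (-3)) none).toList = t.toList.drop (t.toList.length - 3) := by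
    unfold PySem.Str.slice
    rw [PySem.Chars.slice_eq_listSlice, PySem.List.slice_from_neg_ofNat _ 3 (by omega)]
    simp
  have hsplit : t.toList = t.toList.take (t.toList.length - 3) ++ t.toList.drop (t.toList.length - 3) :=
    (List.take_append_drop _ _).symm
  conv_rhs => rw [hsplit]
  rw [List.countP_append, ← hdrop, hEq, hx]
  omega

lemma sliceTo3_toList (t : String) :
    (PySem.Str.slice t none (some (-3))).toList = t.toList.take (t.toList.length - 3) := by
  unfold PySem.Str.slice
  rw [PySem.Chars.slice_eq_listSlice, PySem.List.slice_to_neg_ofNat _ 3 (by omega)]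
  simp

lemma fields_clean (s : Option String) :
    pvFields s = (pvCleanStrA s).map (fun t => (barSplit t.toList).length) := by
  cases s with
  | none => rfl
  | some t =>
    simp only [pvFields, pvCleanStrA]
    split_ifs with h1 h2
    · rfl
    · simp only [Option.map_some, Option.some_inj, barSplit_length, sliceTo3_toList]
      have h2' := h2
      simp only [Bool.or_eq_true, beq_iff_eq] at h2'
      have hcnt : (t.toList.take (t.toList.length - 3)).countP (fun c => decide (c = '|'))
          = t.toList.countP (fun c => decide (c = '|')) := by
        rcases h2' with ((((h|h)|h)|h)|h) <;>
          exact countP_strip t _ (by decide) h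
      rw [hcnt]
      simp [pvBars]
    · simp [barSplit_length, pvBars]

theorem met_annot_parser_eq_alt (input_list : List (Option String))
    (h : Pre_met_annot_parser input_list) :
    met_annot_parser input_list = met_annot_parser_alt input_list := by
  obtain ⟨h6, hcmp⟩ := h
  have hle : ∀ m k, pvCleanStrA (PySem.List.pyGetD input_list 1 none) = some m →
      pvCleanStrA (PySem.List.pyGetD input_list 2 none) = some k →
      (barSplit k.toList).length ≤ (barSplit m.toList).length := by
    intro m k hm hk
    have h1 := fields_clean (PySem.List.pyGetD input_list 1 none)
    have h2 := fields_clean (PySem.List.pyGetD input_list 2 none)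
    rw [hm] at h1
    rw [hk] at h2
    rw [PySem.List.pyGetD_ofNat'] at h1 h2
    rw [h1, h2] at hcmp
    simpa [pvLeOpt] using hcmp
  rw [portA_eq_spec]
  unfold met_annot_parser_alt
  simp only [pvCleanB_eq_cleanA]
  rw [rowsB_spec _ _ _ _ _ _ (by omega) hle]
  simp

-- ===== VERDICT (by name: the statements are the Claim_ definitions above) =====
theorem met_annot_parser_spec : Claim_equal_met_annot_parser := by
  intro input_list _ h
  unfold Spec_met_annot_parser
  exact met_annot_parser_eq_alt input_list h
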